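-- pv_equiv track=rewrite | github.com/TDK1969/My-Leetcode | match/2024.9.21 meituan/2.py | solution
-- ===== SOURCE A (Python) =====
-- from typing import List
--
-- def solution(n: int, m: int, a: List[int], b: List[int], c: List[int]) -> int:
--     d = dict()
--     ans = sum(c)
--
--     for i in range(n):
--         tag = a[i]
--         if b[i] > c[i]:
--             # 打标签是有用的
--             if tag not in d:
--                 d[tag] = i
--                 ans += b[i] - c[i]
--             elif tag in d and b[i] - c[i] > b[d[tag]] - c[d[tag]]:
--                 ans += c[d[tag]] - b[d[tag]] + b[i] - c[i]
--                 d[tag] = i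
--
--     return ans
-- ===== SOURCE B (Python) =====
-- def solution(n, m, a, b, c):
--     pairs = sorted(((a[i], b[i] - c[i]) for i in range(n) if b[i] > c[i]), reverse=True)
--     total = sum(c)
--     prev = None
--     for tag, gain in pairs:
--         if tag != prev:
--             total += gain
--             prev = tag
--     return total
-- ===== Notes on version B (the rewrite author's own statement) =====
-- stated objective: alternative
-- what changed: B replaces A's single hash-scan (dict of best indices per tag with the answer patched incrementally inside the loop) by a sort-based algorithm: it collects the (tag, surplus) pairs with b[i] > c[i], sorts them in descending order, and in one scan over the sorted runs adds the first surplus of each tag run to sum(c).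
import Mathlib
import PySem

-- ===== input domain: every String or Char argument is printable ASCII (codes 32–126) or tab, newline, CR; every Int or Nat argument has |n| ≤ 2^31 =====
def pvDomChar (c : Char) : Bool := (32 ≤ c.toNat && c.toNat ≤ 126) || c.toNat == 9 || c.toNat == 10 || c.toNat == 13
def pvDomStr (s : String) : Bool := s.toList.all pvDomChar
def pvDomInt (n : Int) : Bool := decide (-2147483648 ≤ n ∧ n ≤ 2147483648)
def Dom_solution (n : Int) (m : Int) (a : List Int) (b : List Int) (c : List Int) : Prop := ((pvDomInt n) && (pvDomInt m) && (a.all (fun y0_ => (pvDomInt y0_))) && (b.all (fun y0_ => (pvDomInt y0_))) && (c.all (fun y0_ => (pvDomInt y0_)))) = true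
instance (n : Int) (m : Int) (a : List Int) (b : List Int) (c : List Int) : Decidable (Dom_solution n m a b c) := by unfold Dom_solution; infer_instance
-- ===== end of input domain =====

-- B replaces A's single hash-scan (dict of best indices, answer patched in-loop) by a sort-based
-- algorithm: sort the positive (tag, surplus) pairs descending and add the first surplus of each
-- tag run to sum(c) (objective: alternative).


-- ===== PORT A =====
-- loop body of A's 'for i in range(n)'; state = (d, ans); a[i]/b[i]/c[i] are pyGetD,
-- exact under Pre_solution (which rules out IndexError)
def solutionStep (a b c : List Int) : (PySem.Dict Int Int × Int) → Int → (PySem.Dict Int Int × Int)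
  | (d, ans), i =>
    let tag := PySem.List.pyGetD a i 0
    let bi := PySem.List.pyGetD b i 0
    let ci := PySem.List.pyGetD c i 0
    if bi > ci then
      if d.contains tag = false then
        (d.insert tag i, ans + (bi - ci))
      else if d.contains tag = true ∧ bi - ci > PySem.List.pyGetD b (d.getD tag 0) 0 - PySem.List.pyGetD c (d.getD tag 0) 0 then
        (d.insert tag i, ans + (PySem.List.pyGetD c (d.getD tag 0) 0 - PySem.List.pyGetD b (d.getD tag 0) 0 + (bi - ci)))
      else (d, ans)
    else (d, ans)

def solution (n : Int) (m : Int) (a : List Int) (b : List Int) (c : List Int) : Int :=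
  ((PySem.List.pyRange 0 n 1).foldl (solutionStep a b c) (PySem.Dict.empty, c.sum)).2

-- ===== PORT B =====
-- the generator expression '((a[i], b[i]-c[i]) for i in range(n) if b[i] > c[i])'
def posPairs (n : Int) (a b c : List Int) : List (Int × Int) :=
  ((PySem.List.pyRange 0 n 1).filter
      (fun i => PySem.List.pyGetD b i 0 > PySem.List.pyGetD c i 0)).map
    (fun i => (PySem.List.pyGetD a i 0, PySem.List.pyGetD b i 0 - PySem.List.pyGetD c i 0))

-- loop body of B's scan over the sorted pairs; state = (total, prev)
def scanStep (s : Int × Option Int) (p : Int × Int) : Int × Option Int :=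
  if some p.1 ≠ s.2 then (s.1 + p.2, some p.1) else s

def solution_alt (n : Int) (m : Int) (a : List Int) (b : List Int) (c : List Int) : Int :=
  let pairs := PySem.List.sorted2 (posPairs n a b c) Prod.fst Prod.snd true
  (pairs.foldl scanStep (c.sum, none)).1

-- ===== PRECONDITION & SPEC =====
-- exactly where Python A returns: every i in range(n) must index a, b and c (else IndexError)
def Pre_solution (n : Int) (m : Int) (a : List Int) (b : List Int) (c : List Int) : Prop :=
  n ≤ (a.length : Int) ∧ n ≤ (b.length : Int) ∧ n ≤ (c.length : Int)
instance (n : Int) (m : Int) (a : List Int) (b : List Int) (c : List Int) : Decidable (Pre_solution n m a b c) := by unfold Pre_solution; infer_instance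

def pvWitness_solution : Int × Int × List Int × List Int × List Int := (2, 0, [1, 1], [5, 9], [1, 3])

def Spec_solution (n : Int) (m : Int) (a : List Int) (b : List Int) (c : List Int) (out : Int) : Prop := out = solution_alt n m a b c
instance (n : Int) (m : Int) (a : List Int) (b : List Int) (c : List Int) (out : Int) : Decidable (Spec_solution n m a b c out) := by unfold Spec_solution; infer_instance

-- ===== CLAIM (what is proved, stated in full; the proofs are below) =====
def Claim_equal_solution : Prop := ∀ (n : Int) (m : Int) (a : List Int) (b : List Int) (c : List Int), Dom_solution n m a b c → Pre_solution n m a b c → Spec_solution n m a b c (solution n m a b c)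

-- ===== LEMMAS AND PROOFS =====

-- ---- shared notions: the surplus of item i, the per-tag clamped maximum, the per-tag sum ----

def gfun (b c : List Int) (i : Int) : Int := PySem.List.pyGetD b i 0 - PySem.List.pyGetD c i 0

-- gains-per-tag dict step: keep the maximum positive surplus per tag
def pairStep (G : PySem.Dict Int Int) (p : Int × Int) : PySem.Dict Int Int :=
  if 0 < p.2 then (if p.2 > G.getD p.1 0 then G.insert p.1 p.2 else G) else G

-- the (tag, surplus) pair of index i
def pairFn (a b c : List Int) (i : Int) : Int × Int :=
  (PySem.List.pyGetD a i 0, PySem.List.pyGetD b i 0 - PySem.List.pyGetD c i 0)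

-- maximum of 0 and the surpluses recorded for tag t in L
def mx (t : Int) (L : List (Int × Int)) : Int :=
  ((L.filter (fun q => q.1 == t)).map Prod.snd).foldl max 0

-- total of the per-tag maxima over the distinct tags of L
def tagSum (L : List (Int × Int)) : Int :=
  ((L.map Prod.fst).toFinset).sum (fun t => mx t L)

-- ---- A-side, part 1 (dict of indices ⇒ dict of gains): mapg machinery ----

-- B's gains dict is A's index dict with each stored index replaced by its surplus
def mapg (g : Int → Int) (d : PySem.Dict Int Int) : PySem.Dict Int Int :=
  PySem.Dict.mk (d.items.map (fun p => (p.1, g p.2)))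

-- the gains-dict loop body over indices (intermediate between A's loop and pairStep)
def altStep (a b c : List Int) (gains : PySem.Dict Int Int) (i : Int) : PySem.Dict Int Int :=
  let bi := PySem.List.pyGetD b i 0
  let ci := PySem.List.pyGetD c i 0
  if bi > ci then
    let gain := bi - ci
    let tag := PySem.List.pyGetD a i 0
    if gain > gains.getD tag 0 then gains.insert tag gain else gains
  else gains

theorem mapg_get? (g : Int → Int) (d : PySem.Dict Int Int) (k : Int) :
    (mapg g d).get? k = (d.get? k).map g := by
  obtain ⟨l⟩ := d
  induction l with
  | nil => rfl
  | cons p t ih =>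
    obtain ⟨pk, pv⟩ := p
    simp only [mapg, List.map_cons] at *
    rw [PySem.Dict.get?_mk_cons, PySem.Dict.get?_mk_cons]
    by_cases h : pk == k
    · simp [h]
    · simp only [h, Bool.false_eq_true, if_false]
      exact ih

theorem mapg_keys (g : Int → Int) (d : PySem.Dict Int Int) :
    (mapg g d).keys = d.keys := by
  obtain ⟨l⟩ := d
  simp [mapg, PySem.Dict.keys, List.map_map, Function.comp]

theorem mapg_contains (g : Int → Int) (d : PySem.Dict Int Int) (k : Int) :
    (mapg g d).contains k = d.contains k := by
  rw [PySem.Dict.contains_eq_isSome_get?, PySem.Dict.contains_eq_isSome_get?, mapg_get?]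
  simp

theorem mapg_empty (g : Int → Int) : mapg g PySem.Dict.empty = PySem.Dict.empty := rfl

theorem mapg_insert (g : Int → Int) (d : PySem.Dict Int Int) (k v : Int) :
    mapg g (d.insert k v) = (mapg g d).insert k (g v) := by
  apply PySem.Dict.ext
  rw [show (mapg g (d.insert k v)).items = ((d.insert k v).items).map (fun p => (p.1, g p.2)) from rfl,
    PySem.Dict.items_insert, PySem.Dict.items_insert, mapg_contains]
  by_cases h : d.contains k
  · simp only [h, if_true, mapg, List.map_map]
    apply List.map_congr_left
    intro p _
    by_cases hk : p.1 == k <;> simp [hk, Function.comp]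
  · simp [h, mapg]

theorem sum_map_replace (k v j : Int) :
    ∀ (l : List (Int × Int)), (l.map (·.1)).Nodup → (k, j) ∈ l →
    ((l.map fun p => if p.1 == k then (k, v) else p).map (·.2)).sum
      = (l.map (·.2)).sum - j + v := by
  intro l
  induction l with
  | nil => intro _ h; cases h
  | cons p t ih =>
    intro hnd hmem
    simp only [List.map_cons, List.nodup_cons] at hnd
    rcases List.mem_cons.mp hmem with heq | hmem'
    · subst heq
      have ht : (t.map fun p => if p.1 == k then (k, v) else p) = t := by
        conv_rhs => rw [← List.map_id t]
        apply List.map_congr_left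
        intro q hq
        have hqk : q.1 ≠ k := by
          intro he
          exact hnd.1 (by simpa [he] using List.mem_map_of_mem (f := (·.1)) hq)
        simp [hqk]
      rw [List.map_cons, ht, List.map_cons, List.sum_cons, List.map_cons, List.sum_cons]
      simp only [beq_self_eq_true, if_true]
      ring
    · have hpk : p.1 ≠ k := by
        intro he
        exact hnd.1 (by simpa [he] using List.mem_map_of_mem (f := (·.1)) hmem')
      have hrepl : (if (p.1 == k) = true then (k, v) else p) = p := by simp [hpk]
      rw [List.map_cons, hrepl, List.map_cons, List.sum_cons, List.map_cons, List.sum_cons,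
        ih hnd.2 hmem']
      ring

theorem values_sum_insert_of_get?_eq_some (d : PySem.Dict Int Int) (k v j : Int)
    (hnd : d.keys.Nodup) (h : d.get? k = some j) :
    ((d.insert k v).values).sum = d.values.sum - j + v := by
  have hc : d.contains k = true := by
    rw [PySem.Dict.contains_eq_isSome_get?, h]; rfl
  have hmem : (k, j) ∈ d.items := PySem.Dict.mem_items_of_get?_eq_some d h
  have := sum_map_replace k v j d.items (by simpa [PySem.Dict.keys] using hnd) hmem
  simpa [PySem.Dict.values, PySem.Dict.items_insert_of_contains d v hc] using this

theorem values_sum_insert_of_not_contains (d : PySem.Dict Int Int) (k v : Int)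
    (hc : d.contains k = false) :
    ((d.insert k v).values).sum = d.values.sum + v := by
  simp [PySem.Dict.values, PySem.Dict.items_insert_of_not_contains d v hc]

-- one loop iteration: A's state update corresponds exactly to the gains-dict update
theorem step_agree (a b c : List Int) (d : PySem.Dict Int Int) (ans i : Int)
    (hnd : d.keys.Nodup) (hpos : ∀ p ∈ d.items, 0 < gfun b c p.2) :
    (solutionStep a b c (d, ans) i).1.keys.Nodup ∧
    (∀ p ∈ (solutionStep a b c (d, ans) i).1.items, 0 < gfun b c p.2) ∧
    altStep a b c (mapg (gfun b c) d) i = mapg (gfun b c) (solutionStep a b c (d, ans) i).1 ∧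
    (solutionStep a b c (d, ans) i).2
      = ans - ((mapg (gfun b c) d).values).sum
            + ((mapg (gfun b c) (solutionStep a b c (d, ans) i).1).values).sum := by
  set tag := PySem.List.pyGetD a i 0 with htag
  set bi := PySem.List.pyGetD b i 0 with hbi
  set ci := PySem.List.pyGetD c i 0 with hci
  have hgi : gfun b c i = bi - ci := rfl
  have hndB : (mapg (gfun b c) d).keys.Nodup := by rw [mapg_keys]; exact hnd
  by_cases hbc : bi > ci
  · by_cases hct : d.contains tag = true
    · -- tag already stored at index j
      obtain ⟨j, hj⟩ : ∃ j, d.get? tag = some j := by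
        rw [PySem.Dict.contains_eq_isSome_get?] at hct
        exact Option.isSome_iff_exists.mp hct
      have hjd : d.getD tag 0 = j := PySem.Dict.getD_of_get?_eq_some d 0 hj
      have hgetB : (mapg (gfun b c) d).getD tag 0 = gfun b c j := by
        rw [PySem.Dict.getD_eq_get?_getD, mapg_get?, hj]; rfl
      have hjpos : 0 < gfun b c j :=
        hpos (tag, j) (PySem.Dict.mem_items_of_get?_eq_some d hj)
      by_cases hgt : bi - ci > gfun b c j
      · have hstep : solutionStep a b c (d, ans) i
            = (d.insert tag i, ans + (PySem.List.pyGetD c j 0 - PySem.List.pyGetD b j 0 + (bi - ci))) := by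
          simp only [solutionStep]
          rw [if_pos hbc, if_neg (by rw [← htag]; simp [hct]), hjd,
            if_pos ⟨hct, by simpa [gfun] using hgt⟩]
        refine ⟨?_, ?_, ?_, ?_⟩
        · rw [hstep]; exact PySem.Dict.nodup_keys_insert _ _ _ hnd
        · rw [hstep]
          intro p hp
          rcases (PySem.Dict.mem_items_insert _ _ _ _).mp hp with rfl | ⟨hp', _⟩
          · simpa [hgi] using lt_trans hjpos hgt
          · exact hpos p hp'
        · rw [hstep]
          simp only [altStep, mapg_insert, hgi]
          rw [if_pos hbc, if_pos (by rw [hgetB]; exact hgt)]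
        · rw [hstep, mapg_insert,
            values_sum_insert_of_get?_eq_some _ tag _ (gfun b c j) hndB
              (by rw [mapg_get?, hj]; rfl), hgi]
          simp only [gfun]
          ring
      · have hstep : solutionStep a b c (d, ans) i = (d, ans) := by
          simp only [solutionStep]
          rw [if_pos hbc, if_neg (by rw [← htag]; simp [hct]), hjd,
            if_neg (by rintro ⟨-, h2⟩; exact hgt (by simpa [gfun] using h2))]
        refine ⟨by rw [hstep]; exact hnd, by rw [hstep]; exact hpos, ?_, by rw [hstep]; ring⟩
        rw [hstep]
        simp only [altStep]
        rw [if_pos hbc, if_neg (by rw [hgetB]; exact hgt)]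
    · -- fresh tag
      have hcf : d.contains tag = false := by simpa using hct
      have hstep : solutionStep a b c (d, ans) i = (d.insert tag i, ans + (bi - ci)) := by
        simp only [solutionStep]
        rw [if_pos hbc, if_pos hcf]
      have hgetB : (mapg (gfun b c) d).getD tag 0 = 0 := by
        apply PySem.Dict.getD_of_not_contains
        rw [mapg_contains]; exact hcf
      refine ⟨?_, ?_, ?_, ?_⟩
      · rw [hstep]; exact PySem.Dict.nodup_keys_insert _ _ _ hnd
      · rw [hstep]
        intro p hp
        rcases (PySem.Dict.mem_items_insert _ _ _ _).mp hp with rfl | ⟨hp', _⟩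
        · simpa [hgi] using hbc
        · exact hpos p hp'
      · rw [hstep]
        simp only [altStep, mapg_insert, hgi]
        rw [if_pos hbc, if_pos (by rw [hgetB]; omega)]
      · rw [hstep, mapg_insert, hgi,
          values_sum_insert_of_not_contains _ tag _ (by rw [mapg_contains]; exact hcf)]
        ring
  · have hstep : solutionStep a b c (d, ans) i = (d, ans) := by
      simp only [solutionStep]
      rw [if_neg hbc]
    refine ⟨by rw [hstep]; exact hnd, by rw [hstep]; exact hpos, ?_, by rw [hstep]; ring⟩
    rw [hstep]
    simp only [altStep]
    rw [if_neg hbc]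

-- the loop invariant, folded over any index list L
theorem loop_agree (a b c : List Int) (S : Int) :
    ∀ (L : List Int) (d : PySem.Dict Int Int) (ans : Int),
    d.keys.Nodup → (∀ p ∈ d.items, 0 < gfun b c p.2) →
    ans = S + ((mapg (gfun b c) d).values).sum →
    (L.foldl (altStep a b c) (mapg (gfun b c) d)
        = mapg (gfun b c) (L.foldl (solutionStep a b c) (d, ans)).1) ∧
    (L.foldl (solutionStep a b c) (d, ans)).2
        = S + ((mapg (gfun b c) (L.foldl (solutionStep a b c) (d, ans)).1).values).sum := by
  intro L
  induction L with
  | nil => intro d ans hnd hpos hans; exact ⟨rfl, hans⟩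
  | cons i L ih =>
    intro d ans hnd hpos hans
    obtain ⟨h1, h2, h3, h4⟩ := step_agree a b c d ans i hnd hpos
    have := ih (solutionStep a b c (d, ans) i).1 (solutionStep a b c (d, ans) i).2 h1 h2
      (by rw [h4, hans]; ring)
    simpa [List.foldl_cons, h3] using this

-- A's whole loop as the gains dict: solution = sum(c) + Σ values of the gains dict
theorem solution_eq_values_sum (n m : Int) (a b c : List Int) :
    solution n m a b c
      = c.sum + (((PySem.List.pyRange 0 n 1).foldl (altStep a b c) PySem.Dict.empty).values).sum := by
  unfold solution
  obtain ⟨h1, h2⟩ := loop_agree a b c c.sum (PySem.List.pyRange 0 n 1)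
    PySem.Dict.empty c.sum (by simp [PySem.Dict.keys_empty])
    (by intro p hp; simp [PySem.Dict.empty] at hp)
    (by simp [mapg, PySem.Dict.values, PySem.Dict.empty])
  rw [h2, ← h1, mapg_empty]

-- ---- A-side, part 2: the gains dict as a fold of pairStep over the positive pairs ----

theorem altStep_eq_pairStep (a b c : List Int) (G : PySem.Dict Int Int) (i : Int) :
    altStep a b c G i = pairStep G (pairFn a b c i) := by
  simp only [altStep, pairStep, pairFn]
  rw [if_congr (show (PySem.List.pyGetD b i 0 > PySem.List.pyGetD c i 0)
      ↔ (0 < PySem.List.pyGetD b i 0 - PySem.List.pyGetD c i 0) by omega) rfl rfl]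

theorem foldl_pairStep_filter_pos :
    ∀ (L : List (Int × Int)) (G : PySem.Dict Int Int),
    L.foldl pairStep G = (L.filter (fun p => decide (0 < p.2))).foldl pairStep G := by
  intro L
  induction L with
  | nil => intro G; rfl
  | cons p L ih =>
    intro G
    by_cases h : 0 < p.2
    · simp [h, ih]
    · have : pairStep G p = G := by simp only [pairStep]; rw [if_neg h]
      simp [h, ih, this]

theorem filter_map_pairFn (n : Int) (a b c : List Int) :
    (((PySem.List.pyRange 0 n 1).map (pairFn a b c)).filter (fun p => decide (0 < p.2)))
      = posPairs n a b c := by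
  rw [List.filter_map]
  unfold posPairs
  congr 1
  apply List.filter_congr
  intro i _
  simp only [Function.comp, pairFn, decide_eq_decide]
  omega

theorem gains_dict_eq_fold_posPairs (n : Int) (a b c : List Int) :
    (PySem.List.pyRange 0 n 1).foldl (altStep a b c) PySem.Dict.empty
      = (posPairs n a b c).foldl pairStep PySem.Dict.empty := by
  rw [← filter_map_pairFn, ← foldl_pairStep_filter_pos, List.foldl_map]
  have hfun : (fun (G : PySem.Dict Int Int) i => pairStep G (pairFn a b c i)) = altStep a b c := by
    funext G i
    rw [← altStep_eq_pairStep]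
  rw [hfun]

-- ---- A-side, part 3: characterising the pairStep fold ----

theorem mx_nil (t : Int) : mx t [] = 0 := rfl

theorem mx_append (t : Int) (L : List (Int × Int)) (p : Int × Int) :
    mx t (L ++ [p]) = if p.1 = t then max (mx t L) p.2 else mx t L := by
  by_cases h : p.1 = t <;>
    simp [mx, List.filter_append, h, List.foldl_append]

theorem dict_char :
    ∀ (L : List (Int × Int)), (∀ p ∈ L, 0 < p.2) →
    ((L.foldl pairStep PySem.Dict.empty).keys.Nodup ∧
     (∀ t, (L.foldl pairStep PySem.Dict.empty).getD t 0 = mx t L) ∧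
     (∀ t, (L.foldl pairStep PySem.Dict.empty).contains t = true ↔ t ∈ L.map Prod.fst)) := by
  intro L
  induction L using List.reverseRecOn with
  | nil =>
    intro _
    refine ⟨by simp [PySem.Dict.keys_empty], ?_, ?_⟩
    · intro t; simp [PySem.Dict.getD_empty, mx_nil]
    · intro t; simp [PySem.Dict.contains_empty]
  | append_singleton L p ih =>
    intro hpos
    obtain ⟨hnd, hgetD, hcont⟩ := ih (fun q hq => hpos q (List.mem_append_left _ hq))
    have hp : 0 < p.2 := hpos p (List.mem_append_right _ (by simp))
    rw [List.foldl_append]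
    set G := L.foldl pairStep PySem.Dict.empty with hG
    simp only [List.foldl_cons, List.foldl_nil]
    by_cases hgt : p.2 > G.getD p.1 0
    · have hstep : pairStep G p = G.insert p.1 p.2 := by
        simp only [pairStep]; rw [if_pos hp, if_pos hgt]
      rw [hstep]
      refine ⟨PySem.Dict.nodup_keys_insert _ _ _ hnd, ?_, ?_⟩
      · intro t
        rw [PySem.Dict.getD_insert, mx_append]
        by_cases h : p.1 = t
        · subst h
          rw [if_pos rfl, if_pos rfl, ← hgetD p.1]
          omega
        · rw [if_neg (fun he => h he.symm), if_neg h, hgetD]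
      · intro t
        rw [PySem.Dict.contains_insert, List.map_append]
        by_cases h : t = p.1
        · subst h; simp
        · have hb : (t == p.1) = false := by simpa using h
          rw [hb]
          simp only [Bool.false_or]
          rw [hcont]
          simp [h]
    · have hstep : pairStep G p = G := by
        simp only [pairStep]; rw [if_pos hp, if_neg hgt]
      rw [hstep]
      have hcp : G.contains p.1 = true := by
        by_contra hc
        have : G.getD p.1 0 = 0 :=
          PySem.Dict.getD_of_not_contains _ _ (by simpa using hc)
        omega
      refine ⟨hnd, ?_, ?_⟩
      · intro t
        rw [mx_append]
        by_cases h : p.1 = t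
        · subst h
          rw [if_pos rfl, hgetD, ← hgetD p.1]
          omega
        · rw [if_neg h, hgetD]
      · intro t
        rw [List.map_append]
        by_cases h : t = p.1
        · subst h
          have hm := (hcont p.1).mp hcp
          simp only [hcp, true_iff] at *
          simp [hm]
        · rw [hcont]
          simp [h]

theorem values_sum_eq_tagSum (L : List (Int × Int)) (hpos : ∀ p ∈ L, 0 < p.2) :
    ((L.foldl pairStep PySem.Dict.empty).values).sum = tagSum L := by
  obtain ⟨hnd, hgetD, hcont⟩ := dict_char L hpos
  set G := L.foldl pairStep PySem.Dict.empty with hG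
  have hkeys : G.keys.toFinset = (L.map Prod.fst).toFinset := by
    ext t
    rw [List.mem_toFinset, List.mem_toFinset, ← PySem.Dict.contains_iff_mem_keys]
    exact hcont t
  rw [PySem.Dict.values_eq_map_keys G hnd 0, ← List.sum_toFinset _ hnd, hkeys]
  exact Finset.sum_congr rfl (fun t _ => hgetD t)

-- ---- B-side: order of the reverse-sorted pairs ----

-- 'q ≤ p' in Python's tuple order
def pairGe (p q : Int × Int) : Prop := q.1 < p.1 ∨ (q.1 = p.1 ∧ q.2 ≤ p.2)

-- the comparator sorted2 … true inserts with
def bef (x y : Int × Int) : Bool :=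
  decide (y.1 < x.1) || (!decide (x.1 < y.1) && decide (y.2 < x.2))

theorem bef_true {x y : Int × Int} (h : bef x y = true) : pairGe x y := by
  unfold bef at h
  unfold pairGe
  obtain ⟨x1, x2⟩ := x
  obtain ⟨y1, y2⟩ := y
  simp at h
  omega

theorem bef_false {x y : Int × Int} (h : bef x y = false) : pairGe y x := by
  unfold bef at h
  unfold pairGe
  obtain ⟨x1, x2⟩ := x
  obtain ⟨y1, y2⟩ := y
  simp at h
  omega

theorem pairGe_trans {x y z : Int × Int} (h1 : pairGe x y) (h2 : pairGe y z) : pairGe x z := by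
  unfold pairGe at *
  omega

theorem insertBy_bef_pairwise (x : Int × Int) :
    ∀ (ys : List (Int × Int)), ys.Pairwise pairGe →
    (PySem.List.insertBy bef x ys).Pairwise pairGe := by
  intro ys
  induction ys with
  | nil => intro _; simp [PySem.List.insertBy]
  | cons y ys ih =>
    intro h
    rw [List.pairwise_cons] at h
    by_cases hb : bef x y = true
    · rw [show PySem.List.insertBy bef x (y :: ys) = x :: y :: ys by
        simp [PySem.List.insertBy, hb]]
      rw [List.pairwise_cons]
      refine ⟨?_, List.pairwise_cons.mpr h⟩
      intro z hz
      rcases List.mem_cons.mp hz with rfl | hz'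
      · exact bef_true hb
      · exact pairGe_trans (bef_true hb) (h.1 z hz')
    · rw [show PySem.List.insertBy bef x (y :: ys) = y :: PySem.List.insertBy bef x ys by
        simp [PySem.List.insertBy, hb]]
      rw [List.pairwise_cons]
      refine ⟨?_, ih h.2⟩
      intro z hz
      rcases (PySem.List.insertBy_mem_iff _ _ _ _).mp hz with rfl | hz'
      · exact bef_false (Bool.not_eq_true _ ▸ (by simpa using hb))
      · exact h.1 z hz'

theorem foldl_insertBy_bef_pairwise :
    ∀ (L acc : List (Int × Int)), acc.Pairwise pairGe →
    (L.foldl (fun acc x => PySem.List.insertBy bef x acc) acc).Pairwise pairGe := by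
  intro L
  induction L with
  | nil => intro acc h; exact h
  | cons p L ih =>
    intro acc h
    exact ih _ (insertBy_bef_pairwise p acc h)

theorem sorted2_rev_eq_foldl (L : List (Int × Int)) :
    PySem.List.sorted2 L Prod.fst Prod.snd true
      = L.foldl (fun acc x => PySem.List.insertBy bef x acc) [] := rfl

theorem sorted2_rev_pairwise (L : List (Int × Int)) :
    (PySem.List.sorted2 L Prod.fst Prod.snd true).Pairwise pairGe := by
  rw [sorted2_rev_eq_foldl]
  exact foldl_insertBy_bef_pairwise L [] (by simp)

-- ---- tagSum: permutation invariance and the peel-one-tag identity ----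

theorem mx_perm (t : Int) {Q L : List (Int × Int)} (h : Q.Perm L) : mx t Q = mx t L := by
  unfold mx
  exact List.Perm.foldl_op_eq ((h.filter _).map _)

theorem tagSum_perm {Q L : List (Int × Int)} (h : Q.Perm L) : tagSum Q = tagSum L := by
  unfold tagSum
  rw [List.toFinset_eq_of_perm _ _ (h.map Prod.fst)]
  exact Finset.sum_congr rfl (fun t _ => mx_perm t h)

theorem foldl_max_of_le (x : Int) :
    ∀ (l : List Int), (∀ y ∈ l, y ≤ x) → l.foldl max x = x := by
  intro l
  induction l with
  | nil => intro _; rfl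
  | cons y l ih =>
    intro h
    have : max x y = x := by
      have := h y (by simp)
      omega
    simp only [List.foldl_cons, this]
    exact ih (fun z hz => h z (by simp [hz]))

theorem map_fst_filter_ne (t1 : Int) (Q : List (Int × Int)) :
    (Q.filter (fun p => p.1 != t1)).map Prod.fst = (Q.map Prod.fst).filter (fun x => x != t1) := by
  induction Q with
  | nil => rfl
  | cons p Q ih => by_cases h : p.1 = t1 <;> simp [h, ih]

theorem mx_filter_ne (t t1 : Int) (hne : t ≠ t1) (Q : List (Int × Int)) :
    mx t (Q.filter (fun p => p.1 != t1)) = mx t Q := by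
  unfold mx
  congr 2
  rw [List.filter_filter]
  apply List.filter_congr
  intro p _
  by_cases h : p.1 = t
  · simp [h, hne]
  · simp [h]

theorem tagSum_cons (t1 g1 : Int) (Q : List (Int × Int))
    (hg : 0 < g1) (hmax : ∀ p ∈ Q, p.1 = t1 → p.2 ≤ g1) :
    tagSum ((t1, g1) :: Q) = g1 + tagSum (Q.filter (fun p => p.1 != t1)) := by
  unfold tagSum
  have hT : (((t1, g1) :: Q).map Prod.fst).toFinset
      = insert t1 (Q.map Prod.fst).toFinset := by simp
  have hmx1 : mx t1 ((t1, g1) :: Q) = g1 := by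
    unfold mx
    rw [List.filter_cons]
    simp only [beq_self_eq_true, if_pos]
    rw [List.map_cons, List.foldl_cons, show max 0 g1 = g1 by omega]
    apply foldl_max_of_le
    intro y hy
    obtain ⟨p, hp, rfl⟩ := List.mem_map.mp hy
    have hp' := List.mem_filter.mp hp
    exact hmax p hp'.1 (by simpa using hp'.2)
  have hmxne : ∀ t, t ≠ t1 → mx t ((t1, g1) :: Q) = mx t (Q.filter (fun p => p.1 != t1)) := by
    intro t ht
    rw [mx_filter_ne t t1 ht]
    unfold mx
    rw [List.filter_cons]
    have hb : (((t1, g1) : Int × Int).1 == t) = false := by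
      simpa using fun h => ht h.symm
    rw [hb, if_neg (by simp)]
  have hTf : ((Q.filter (fun p => p.1 != t1)).map Prod.fst).toFinset
      = (Q.map Prod.fst).toFinset.erase t1 := by
    rw [map_fst_filter_ne, List.toFinset_filter, ← Finset.filter_ne']
    apply Finset.filter_congr
    intro x _
    simp [bne_iff_ne]
  rw [hT, ← Finset.add_sum_erase _ _ (Finset.mem_insert_self t1 _), hmx1,
    Finset.erase_insert_eq_erase, hTf]
  congr 1
  apply Finset.sum_congr rfl
  intro t ht
  exact hmxne t (Finset.ne_of_mem_erase ht)

-- ---- B-side: the run scan over a reverse-sorted list computes tagSum ----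

theorem scan_some :
    ∀ (Q : List (Int × Int)) (t0 tot : Int), Q.Pairwise pairGe → (∀ p ∈ Q, 0 < p.2) →
    (∀ p ∈ Q, p.1 ≤ t0) →
    (Q.foldl scanStep (tot, some t0)).1 = tot + tagSum (Q.filter (fun p => p.1 != t0)) := by
  intro Q
  induction Q with
  | nil => intro t0 tot _ _ _; simp [tagSum, mx]
  | cons p Q ih =>
    intro t0 tot hpw hpos hle
    obtain ⟨t1, g1⟩ := p
    rw [List.pairwise_cons] at hpw
    by_cases h : t1 = t0
    · subst h
      have hstep : scanStep (tot, some t1) (t1, g1) = (tot, some t1) := by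
        simp [scanStep]
      rw [List.foldl_cons, hstep, List.filter_cons]
      simp only [bne_self_eq_false, Bool.false_eq_true, if_false]
      exact ih t1 tot hpw.2 (fun q hq => hpos q (by simp [hq]))
        (fun q hq => hle q (by simp [hq]))
    · have hstep : scanStep (tot, some t0) (t1, g1) = (tot + g1, some t1) := by
        simp [scanStep, h]
      have hQle : ∀ q ∈ Q, q.1 ≤ t1 := by
        intro q hq
        have := hpw.1 q hq
        unfold pairGe at this
        omega
      have hQne : Q.filter (fun p => p.1 != t0) = Q := by
        apply List.filter_eq_self.mpr
        intro q hq
        have h1 := hQle q hq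
        have h2 := hle (t1, g1) (by simp)
        simp only [bne_iff_ne, ne_eq]
        omega
      rw [List.foldl_cons, hstep, List.filter_cons]
      simp only [bne_iff_ne, ne_eq, h, not_false_eq_true, if_true]
      rw [ih t1 (tot + g1) hpw.2 (fun q hq => hpos q (by simp [hq])) hQle, hQne,
        tagSum_cons t1 g1 Q (hpos (t1, g1) (by simp))
          (fun q hq hq1 => by
            have := hpw.1 q hq
            unfold pairGe at this
            omega)]
      ring

theorem scan_none (Q : List (Int × Int)) (tot : Int)
    (hpw : Q.Pairwise pairGe) (hpos : ∀ p ∈ Q, 0 < p.2) :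
    (Q.foldl scanStep (tot, none)).1 = tot + tagSum Q := by
  cases Q with
  | nil => simp [tagSum, mx]
  | cons p Q =>
    obtain ⟨t1, g1⟩ := p
    rw [List.pairwise_cons] at hpw
    have hstep : scanStep (tot, none) (t1, g1) = (tot + g1, some t1) := by
      simp [scanStep]
    have hQle : ∀ q ∈ Q, q.1 ≤ t1 := by
      intro q hq
      have := hpw.1 q hq
      unfold pairGe at this
      omega
    rw [List.foldl_cons, hstep,
      scan_some Q t1 (tot + g1) hpw.2 (fun q hq => hpos q (by simp [hq])) hQle,
      tagSum_cons t1 g1 Q (hpos (t1, g1) (by simp))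
        (fun q hq hq1 => by
          have := hpw.1 q hq
          unfold pairGe at this
          omega)]
    ring

theorem posPairs_pos (n : Int) (a b c : List Int) :
    ∀ p ∈ posPairs n a b c, 0 < p.2 := by
  intro p hp
  obtain ⟨i, hi, rfl⟩ := List.mem_map.mp hp
  have := (List.mem_filter.mp hi).2
  simp only [decide_eq_true_eq] at this
  simp only []
  omega

-- ===== VERDICT (by name: the statement is the Claim_ definition above) =====
theorem solution_spec : Claim_equal_solution := by
  intro n m a b c _ _
  unfold Spec_solution
  have hpos := posPairs_pos n a b c
  have hperm := PySem.List.sorted2_perm (posPairs n a b c) Prod.fst Prod.snd true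
  have hA : solution n m a b c = c.sum + tagSum (posPairs n a b c) := by
    rw [solution_eq_values_sum, gains_dict_eq_fold_posPairs, values_sum_eq_tagSum _ hpos]
  have hB : solution_alt n m a b c = c.sum + tagSum (posPairs n a b c) := by
    unfold solution_alt
    rw [scan_none _ _ (sorted2_rev_pairwise _)
      (fun p hp => hpos p (hperm.mem_iff.mp hp)), tagSum_perm hperm]
  rw [hA, hB]
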